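-- pv_equiv track=rewrite | github.com/saketj5/Notes_Codility | practiceQuestions/greedyFittingProblem.py | min_containers
-- ===== SOURCE A (Python) =====
-- def min_containers(boxes, W):
--     boxes.sort(reverse=True)
--     containers = []
--     for box in boxes:
--         placed = False
--         for i in range(len(containers)):
--             if containers[i] + box <= W:
--                 containers[i] += box
--                 placed = True
--                 break
--         if not placed:
--             containers.append(box)
--     return len(containers)
-- ===== SOURCE B (Python) =====
-- def min_containers(boxes, W):
--     # Bin-major first-fit-decreasing: fill one container at a time with a single
--     # pass over the remaining boxes; yields the same packing as item-major first-fit.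
--     boxes.sort(reverse=True)
--     pending = boxes
--     count = 0
--     while pending:
--         load = pending[0]
--         rest = []
--         for x in pending[1:]:
--             if load + x <= W:
--                 load += x
--             else:
--                 rest.append(x)
--         pending = rest
--         count += 1
--     return count
-- ===== Notes on version B (the rewrite author's own statement) =====
-- stated objective: alternative
-- what changed: B packs bin-major (open one container, fill it in a single pass over the remaining sorted boxes, repeat) instead of A's item-major first-fit with an inner scan over open containers; the two traversal orders provably produce the same packing.
import Mathlib
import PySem

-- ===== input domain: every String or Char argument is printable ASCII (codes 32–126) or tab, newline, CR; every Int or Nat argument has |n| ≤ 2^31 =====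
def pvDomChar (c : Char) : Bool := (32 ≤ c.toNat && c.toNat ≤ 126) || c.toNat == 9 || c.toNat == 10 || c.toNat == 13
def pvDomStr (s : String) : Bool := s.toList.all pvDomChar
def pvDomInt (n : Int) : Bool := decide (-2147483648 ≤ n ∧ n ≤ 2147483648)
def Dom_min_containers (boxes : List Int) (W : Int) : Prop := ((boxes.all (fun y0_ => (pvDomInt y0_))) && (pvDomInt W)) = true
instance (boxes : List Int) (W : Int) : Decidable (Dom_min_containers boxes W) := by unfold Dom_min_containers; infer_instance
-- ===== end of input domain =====

-- B fills containers bin-major (one container at a time, one pass over the remaining sorted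
-- boxes) instead of A's item-major first-fit with an inner scan over open containers; same
-- result, similar cost ("alternative"). Both Pythons sort `boxes` in place (same side effect);
-- the equivalence proved here is about the return value.

-- ===== PORT A =====
-- inner `for i in range(len(containers))` with break, mutating containers[i]
def pvLoopA (W box : Int) (containers : List Int) (i : Nat) : List Int × Bool :=
  if h : i < containers.length then
    if containers[i]! + box ≤ W then (containers.set i (containers[i]! + box), true)
    else pvLoopA W box containers (i + 1)
  else (containers, false)
termination_by containers.length - i

-- body of A's outer loop
def pvStepA (W : Int) (containers : List Int) (box : Int) : List Int :=
  let r := pvLoopA W box containers 0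
  if r.2 then r.1 else r.1 ++ [box]

def min_containers (boxes : List Int) (W : Int) : Int :=
  let bs := PySem.List.sorted boxes (fun x => x) true
  ((bs.foldl (pvStepA W) []).length : Int)

-- ===== PORT B =====
-- one pass filling the current container: `load`/`rest` accumulators of Source B's inner loop
def pvFill (W load : Int) (rest : List Int) : List Int → Int × List Int
  | [] => (load, rest)
  | x :: xs => if load + x ≤ W then pvFill W (load + x) rest xs
               else pvFill W load (rest ++ [x]) xs

-- needed by pvBins for termination
theorem pvFill_snd_length (W : Int) : ∀ (p : List Int) (load : Int) (rest : List Int),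
    (pvFill W load rest p).2.length ≤ rest.length + p.length := by
  intro p
  induction p with
  | nil => intro load rest; simp [pvFill]
  | cons x xs ih =>
    intro load rest
    rw [pvFill]
    by_cases h : load + x ≤ W
    · simp only [h, if_pos]
      have := ih (load + x) rest
      simp only [List.length_cons]; omega
    · simp only [h, if_neg, not_false_iff]
      have := ih load (rest ++ [x])
      simp only [List.length_append, List.length_cons, List.length_nil] at this ⊢
      omega

-- Source B's `while pending:` loop
def pvBins (W : Int) (pending : List Int) (count : Int) : Int :=
  match pending with
  | [] => count
  | x :: xs => pvBins W (pvFill W x [] xs).2 (count + 1)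
termination_by pending.length
decreasing_by
  have := pvFill_snd_length W xs x []
  simp only [List.length_nil, Nat.zero_add] at this
  simp only [List.length_cons]; omega

def min_containers_alt (boxes : List Int) (W : Int) : Int :=
  let bs := PySem.List.sorted boxes (fun x => x) true
  pvBins W bs 0

-- ===== PRECONDITION & SPEC =====
def Spec_min_containers (boxes : List Int) (W : Int) (out : Int) : Prop := out = min_containers_alt boxes W
instance (boxes : List Int) (W : Int) (out : Int) : Decidable (Spec_min_containers boxes W out) := by unfold Spec_min_containers; infer_instance

-- ===== CLAIM (what is proved, stated in full; the proofs are below) =====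
def Claim_equal_min_containers : Prop := ∀ (boxes : List Int) (W : Int), Dom_min_containers boxes W → Spec_min_containers boxes W (min_containers boxes W)

-- ===== LEMMAS AND PROOFS =====

-- structural form of A's first-fit insertion
def pvIns (W x : Int) : List Int → List Int
  | [] => [x]
  | c :: cs => if c + x ≤ W then (c + x) :: cs else c :: pvIns W x cs

-- structural form of B's single-container fill
def pvFill1 (W load : Int) : List Int → Int × List Int
  | [] => (load, [])
  | x :: xs => if load + x ≤ W then pvFill1 W (load + x) xs
               else ((pvFill1 W load xs).1, x :: (pvFill1 W load xs).2)

theorem pvLoopA_stop (W box : Int) (containers : List Int) (i : Nat)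
    (h : ¬ i < containers.length) : pvLoopA W box containers i = (containers, false) := by
  rw [pvLoopA]; simp [h]

theorem pvLoopA_hit (W box : Int) (containers : List Int) (i : Nat)
    (h : i < containers.length) (hfit : containers[i]! + box ≤ W) :
    pvLoopA W box containers i = (containers.set i (containers[i]! + box), true) := by
  rw [pvLoopA]
  simp only [List.getElem!_eq_getElem?_getD, List.getElem?_eq_getElem h, Option.getD_some] at hfit ⊢
  simp [h, hfit]

theorem pvLoopA_miss (W box : Int) (containers : List Int) (i : Nat)
    (h : i < containers.length) (hfit : ¬ containers[i]! + box ≤ W) :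
    pvLoopA W box containers i = pvLoopA W box containers (i + 1) := by
  rw [pvLoopA]
  simp only [List.getElem!_eq_getElem?_getD, List.getElem?_eq_getElem h, Option.getD_some] at hfit ⊢
  simp [h, hfit]

theorem pvLoopA_shift (W box : Int) : ∀ (n : Nat) (cs : List Int) (c : Int) (i : Nat),
    cs.length - i ≤ n →
    pvLoopA W box (c :: cs) (i + 1) = (c :: (pvLoopA W box cs i).1, (pvLoopA W box cs i).2) := by
  intro n
  induction n with
  | zero =>
    intro cs c i h
    have h1 : ¬ i < cs.length := by omega
    have h2 : ¬ i + 1 < (c :: cs).length := by simp only [List.length_cons]; omega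
    rw [pvLoopA_stop W box cs i h1, pvLoopA_stop W box (c :: cs) (i + 1) h2]
  | succ n ih =>
    intro cs c i h
    have hget : (c :: cs)[i + 1]! = cs[i]! := by
      simp [List.getElem!_eq_getElem?_getD]
    by_cases hi : i < cs.length
    · have hi' : i + 1 < (c :: cs).length := by simp only [List.length_cons]; omega
      by_cases hfit : cs[i]! + box ≤ W
      · rw [pvLoopA_hit W box (c :: cs) (i + 1) hi' (by rw [hget]; exact hfit),
            pvLoopA_hit W box cs i hi hfit, hget]
        simp
      · rw [pvLoopA_miss W box (c :: cs) (i + 1) hi' (by rw [hget]; exact hfit),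
            pvLoopA_miss W box cs i hi hfit]
        exact ih cs c (i + 1) (by omega)
    · have h2 : ¬ i + 1 < (c :: cs).length := by simp only [List.length_cons]; omega
      rw [pvLoopA_stop W box cs i hi, pvLoopA_stop W box (c :: cs) (i + 1) h2]

theorem pvStepA_eq_ins (W : Int) : ∀ (cs : List Int) (box : Int),
    pvStepA W cs box = pvIns W box cs := by
  intro cs
  induction cs with
  | nil => intro box; simp [pvStepA, pvLoopA, pvIns]
  | cons c cs ih =>
    intro box
    unfold pvStepA
    rw [pvLoopA]
    have h : 0 < (c :: cs).length := by simp
    simp only [h, dif_pos]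
    have hget : (c :: cs)[0]! = c := by simp
    rw [hget]
    by_cases hfit : c + box ≤ W
    · simp [hfit, pvIns]
    · simp only [hfit, if_neg, not_false_iff]
      rw [pvLoopA_shift W box cs.length cs c 0 (by omega)]
      have hstep := ih box
      unfold pvStepA at hstep
      rw [pvIns]
      simp only [hfit, if_neg, not_false_iff]
      by_cases hr : (pvLoopA W box cs 0).2
      · simp only [hr, if_pos] at hstep ⊢
        rw [← hstep]
      · simp only [hr, if_neg, Bool.false_eq_true, not_false_iff] at hstep ⊢
        rw [← hstep]
        simp

theorem foldl_ins_cons (W : Int) : ∀ (xs : List Int) (c : Int) (cs : List Int),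
    List.foldl (fun L x => pvIns W x L) (c :: cs) xs
      = (pvFill1 W c xs).1 :: List.foldl (fun L x => pvIns W x L) cs (pvFill1 W c xs).2 := by
  intro xs
  induction xs with
  | nil => intro c cs; simp [pvFill1]
  | cons x xs ih =>
    intro c cs
    rw [List.foldl_cons, pvFill1]
    by_cases hfit : c + x ≤ W
    · simp only [pvIns, hfit, if_pos]
      exact ih (c + x) cs
    · simp only [pvIns, hfit, if_neg, not_false_iff]
      rw [ih c (pvIns W x cs)]
      rw [List.foldl_cons]

theorem pvFill1_snd_length (W : Int) : ∀ (p : List Int) (load : Int),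
    (pvFill1 W load p).2.length ≤ p.length := by
  intro p
  induction p with
  | nil => intro load; simp [pvFill1]
  | cons x xs ih =>
    intro load
    rw [pvFill1]
    by_cases h : load + x ≤ W
    · simp only [h, if_pos]
      have := ih (load + x)
      simp only [List.length_cons]; omega
    · simp only [h, if_neg, not_false_iff, List.length_cons]
      have := ih load
      omega

theorem pvFill_eq (W : Int) : ∀ (p : List Int) (load : Int) (rest : List Int),
    pvFill W load rest p = ((pvFill1 W load p).1, rest ++ (pvFill1 W load p).2) := by
  intro p
  induction p with
  | nil => intro load rest; simp [pvFill, pvFill1]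
  | cons x xs ih =>
    intro load rest
    rw [pvFill, pvFill1]
    by_cases h : load + x ≤ W
    · simp only [h, if_pos]
      exact ih (load + x) rest
    · simp only [h, if_neg, not_false_iff]
      rw [ih load (rest ++ [x])]
      simp

theorem pvBins_eq (W : Int) : ∀ (n : Nat) (p : List Int), p.length ≤ n → ∀ (count : Int),
    pvBins W p count = count + ((List.foldl (fun L x => pvIns W x L) [] p).length : Int) := by
  intro n
  induction n with
  | zero =>
    intro p hp count
    have : p = [] := List.eq_nil_of_length_eq_zero (by omega)
    subst this
    simp [pvBins]
  | succ n ih =>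
    intro p hp count
    match p with
    | [] => simp [pvBins]
    | x :: xs =>
      rw [pvBins]
      rw [pvFill_eq]
      simp only [List.nil_append]
      have hlen : (pvFill1 W x xs).2.length ≤ n := by
        have := pvFill1_snd_length W xs x
        simp only [List.length_cons] at hp
        omega
      rw [ih (pvFill1 W x xs).2 hlen (count + 1)]
      have hfold : List.foldl (fun L x => pvIns W x L) [] (x :: xs)
          = (pvFill1 W x xs).1 :: List.foldl (fun L x => pvIns W x L) [] (pvFill1 W x xs).2 := by
        rw [List.foldl_cons]
        have : pvIns W x [] = [x] := rfl
        rw [this]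
        exact foldl_ins_cons W xs x []
      rw [hfold]
      simp only [List.length_cons]
      push_cast
      ring

theorem stepA_fun_eq (W : Int) : pvStepA W = fun L x => pvIns W x L := by
  funext L x
  exact pvStepA_eq_ins W L x

-- ===== VERDICT (by name: the statement is the Claim_ definition above) =====
theorem min_containers_spec : Claim_equal_min_containers := by
  intro boxes W _
  unfold Spec_min_containers min_containers min_containers_alt
  rw [stepA_fun_eq]
  rw [pvBins_eq W (PySem.List.sorted boxes (fun x => x) true).length _ (le_refl _) 0]
  simp
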